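-- pv_equiv track=rewrite | github.com/noaakayad/Python-Programs | Lists, Strings, Tuples 1.py | question_4
-- ===== SOURCE A (Python) =====
-- def question_4(dishes):
--     """
--     Finds the name of the dish with the most number of ingredients.
--     If there is a tie, return the last one.
--     --
--     Parameters:
--         dishes: dictionary with dishes as keys and ingredients as values
--     --
--     Returns:
--         The name of the dish.
--
--     >>> recipe1 = {"Tacos": ["Spices","Beef", "Salsa"], \
-- "Omelet": ["Eggs","Milk", "Salt", "Butter"]}
--     >>> question_4(recipe1)
--     'Omelet'
--     >>> recipe2 = {}
--     >>> question_4(recipe2)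
--     ''
--     >>> recipe3 = {"Salad": [], "Hotpot": [], "Burger": []}
--     >>> question_4(recipe3)
--     'Burger'
--     """
--     if dishes == {} :
--         return ''
--
--     all_ingredients = list(dishes.values())
--
--     len_ingredients = []
--
--     for ingredients in all_ingredients :
--         len_ingredients.append(len(ingredients))
--
--     max_ingredients = max(len_ingredients)
--
--     res = ''
--
--     for key, value in dishes.items() :
--         if len(value) == max_ingredients :
--             res = key
--
--     return res
-- ===== SOURCE B (Python) =====
-- def question_4(dishes):
--     if not dishes:
--         return ''
--     return sorted(dishes.items(), key=lambda kv: len(kv[1]))[-1][0]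
-- ===== Notes on version B (the rewrite author's own statement) =====
-- stated objective: simpler
-- what changed: Replaced A's three linear passes (collect values, take max length, rescan for the last key with that length) by a single stable ascending sort of the items on ingredient count and returning the last element's key, which is the last max-length dish by stability.
import Mathlib
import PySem

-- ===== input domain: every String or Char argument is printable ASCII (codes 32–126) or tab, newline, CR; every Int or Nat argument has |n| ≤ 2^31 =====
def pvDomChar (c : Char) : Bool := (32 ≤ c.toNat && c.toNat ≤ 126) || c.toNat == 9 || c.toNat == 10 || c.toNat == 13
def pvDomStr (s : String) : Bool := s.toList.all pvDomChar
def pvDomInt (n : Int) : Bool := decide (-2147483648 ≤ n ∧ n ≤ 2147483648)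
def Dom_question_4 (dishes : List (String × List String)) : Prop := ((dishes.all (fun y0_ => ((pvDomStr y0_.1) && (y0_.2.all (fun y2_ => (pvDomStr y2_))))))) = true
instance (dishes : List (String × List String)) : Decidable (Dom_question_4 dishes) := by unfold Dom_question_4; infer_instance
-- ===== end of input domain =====

-- B replaces A's three linear passes (collect values, max of lengths, rescan for the
-- last key with the max length) by a single stable ascending sort on ingredient count
-- and taking the last element's key: simpler, same result (last on tie by stability).

-- ===== PORT A =====
def question_4 (dishes : List (String × List String)) : String :=
  let d := PySem.Dict.ofList dishes
  if d.items = [] then ""                    -- dishes == {}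
  else
    let all_ingredients := d.values
    let len_ingredients :=
      all_ingredients.foldl (fun acc ingredients => acc ++ [(ingredients.length : Int)]) []
    -- max(len_ingredients); the list is nonempty here so Python's max cannot raise
    let max_ingredients := (PySem.List.max? len_ingredients (fun x => x)).getD 0
    d.items.foldl (fun res kv => if (kv.2.length : Int) = max_ingredients then kv.1 else res) ""

-- ===== PORT B =====
def question_4_alt (dishes : List (String × List String)) : String :=
  let d := PySem.Dict.ofList dishes
  if d.items = [] then ""                    -- not dishes
  else
    match PySem.List.pyGet? (PySem.List.sorted d.items (fun kv => (kv.2.length : Int))) (-1) with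
    | some kv => kv.1
    | none => ""                             -- unreachable: sorted list of a nonempty dict is nonempty

-- ===== PRECONDITION & SPEC =====
def Spec_question_4 (dishes : List (String × List String)) (out : String) : Prop := out = question_4_alt dishes
instance (dishes : List (String × List String)) (out : String) : Decidable (Spec_question_4 dishes out) := by unfold Spec_question_4; infer_instance

-- ===== CLAIM (what is proved, stated in full; the proofs are below) =====
def Claim_equal_question_4 : Prop := ∀ (dishes : List (String × List String)), Dom_question_4 dishes → Spec_question_4 dishes (question_4 dishes)

-- ===== LEMMAS AND PROOFS =====

-- the sort key both programs compare on
def pvKey (kv : String × List String) : Int := (kv.2.length : Int)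

-- running max of the keys of a list, seeded below every actual key
def pvMax (l : List (String × List String)) : Int := (l.map pvKey).foldl max (-1)

theorem pvKey_nonneg (kv : String × List String) : 0 ≤ pvKey kv := Int.natCast_nonneg _

theorem pvMax_append (xs : List (String × List String)) (p : String × List String) :
    pvMax (xs ++ [p]) = max (pvMax xs) (pvKey p) := by
  simp [pvMax, List.foldl_append]

theorem pvMax_mem (xs : List (String × List String)) (h : pvMax xs ≠ -1) :
    ∃ y ∈ xs, pvKey y = pvMax xs := by
  rcases PySem.List.foldl_max_mem (xs.map pvKey) (-1) with h1 | h1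
  · exact absurd h1 h
  · rcases List.mem_map.mp h1 with ⟨y, hy, hk⟩
    exact ⟨y, hy, hk⟩

theorem pvMax_eq_max?_getD (x : String × List String) (t : List (String × List String)) :
    pvMax (x :: t) = (PySem.List.max? ((x :: t).map pvKey) (fun y => y)).getD 0 := by
  simp only [List.map_cons, PySem.List.max?_id_cons, Option.getD_some, pvMax, List.foldl_cons]
  have : max (-1) (pvKey x) = pvKey x := max_eq_right (by have := pvKey_nonneg x; omega)
  rw [this]

-- inserting an element whose key is strictly below some element of ys keeps the last element
theorem getLast?_insertBy (bef : (String × List String) → (String × List String) → Bool)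
    (x : String × List String) (ys : List (String × List String))
    (h : ∃ y ∈ ys, bef x y = true) :
    (PySem.List.insertBy bef x ys).getLast? = ys.getLast? := by
  induction ys with
  | nil => rcases h with ⟨y, hy, _⟩; cases hy
  | cons y t ih =>
    by_cases hb : bef x y = true
    · simp [PySem.List.insertBy, hb]
    · have ht : ∃ z ∈ t, bef x z = true := by
        rcases h with ⟨z, hz, hbz⟩
        rcases List.mem_cons.mp hz with rfl | hz'
        · exact absurd hbz hb
        · exact ⟨z, hz', hbz⟩
      have hne : PySem.List.insertBy bef x t ≠ [] := by
        intro hnil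
        have : x ∈ PySem.List.insertBy bef x t := (PySem.List.mem_insertBy _ _ _ _).mpr (Or.inl rfl)
        simp [hnil] at this
      have hne' : t ≠ [] := by rcases ht with ⟨z, hz, _⟩; exact List.ne_nil_of_mem hz
      have cons_last : ∀ (y : String × List String) (zs : List (String × List String)), zs ≠ [] →
          (y :: zs).getLast? = zs.getLast? := by
        intro y zs hzs
        cases zs with
        | nil => exact absurd rfl hzs
        | cons a l => simp [List.getLast?_cons_cons]
      rw [PySem.List.insertBy, if_neg hb]
      rw [cons_last _ _ hne, cons_last _ _ hne', ih ht]

-- sorting a snoc = insert the new element into the sorted prefix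
theorem sorted_append_singleton (xs : List (String × List String)) (p : String × List String) :
    PySem.List.sorted (xs ++ [p]) pvKey =
      PySem.List.insertBy (fun a b => decide (pvKey a < pvKey b)) p (PySem.List.sorted xs pvKey) := by
  rw [PySem.List.sorted_eq_foldl_insertBy, PySem.List.sorted_eq_foldl_insertBy, List.foldl_append]
  rfl

-- A's final scan (with the true max) returns the key of the last element of the stable sort
theorem pvMain (l : List (String × List String)) :
    l.foldl (fun res kv => if pvKey kv = pvMax l then kv.1 else res) "" =
      ((PySem.List.sorted l pvKey).getLast?.map (·.1)).getD "" := by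
  induction l using List.reverseRecOn with
  | nil => simp [PySem.List.sorted]
  | append_singleton xs p ih =>
    rw [sorted_append_singleton, List.foldl_append, pvMax_append]
    by_cases hle : pvMax xs ≤ pvKey p
    · have hmax : max (pvMax xs) (pvKey p) = pvKey p := max_eq_right hle
      rw [hmax]
      have hnb : ∀ y ∈ PySem.List.sorted xs pvKey, (fun a b => decide (pvKey a < pvKey b)) p y = false := by
        intro y hy
        have hy' : y ∈ xs := (PySem.List.mem_sorted _ _ _ _).mp hy
        have : pvKey y ≤ pvMax xs := by
          have := (PySem.List.le_foldl_max (xs.map pvKey) (-1)).2 (pvKey y) (List.mem_map_of_mem hy')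
          exact this
        simp only [decide_eq_false_iff_not, not_lt]
        omega
      rw [PySem.List.insertBy_of_forall_not_before _ _ _ hnb]
      rw [List.foldl_cons, List.foldl_nil, if_pos rfl, List.getLast?_concat]
      rfl
    · rw [not_le] at hle
      have hmax : max (pvMax xs) (pvKey p) = pvMax xs := max_eq_left (le_of_lt hle)
      rw [hmax]
      have hMne : pvMax xs ≠ -1 := by have := pvKey_nonneg p; omega
      rcases pvMax_mem xs hMne with ⟨y, hy, hky⟩
      have hex : ∃ z ∈ PySem.List.sorted xs pvKey, (fun a b => decide (pvKey a < pvKey b)) p z = true := by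
        refine ⟨y, (PySem.List.mem_sorted _ _ _ _).mpr hy, ?_⟩
        simp only [decide_eq_true_eq]
        omega
      rw [getLast?_insertBy _ _ _ hex]
      have hne : pvKey p ≠ pvMax xs := by omega
      rw [List.foldl_cons, List.foldl_nil, if_neg hne]
      exact ih

theorem pv_equal (dishes : List (String × List String)) :
    question_4 dishes = question_4_alt dishes := by
  unfold question_4 question_4_alt
  by_cases h : (PySem.Dict.ofList dishes).items = []
  · simp [h]
  · simp only [h, if_false]
    rcases List.exists_cons_of_ne_nil h with ⟨x, t, hxt⟩
    have hval : (PySem.Dict.ofList dishes).values = (PySem.Dict.ofList dishes).items.map (·.2) := rfl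
    rw [hval, PySem.List.foldl_append_singleton_eq_map, List.nil_append, List.map_map, hxt]
    show (x :: t).foldl
        (fun res kv => if pvKey kv = (PySem.List.max? ((x :: t).map pvKey) (fun y => y)).getD 0 then kv.1 else res) "" =
      (match PySem.List.pyGet? (PySem.List.sorted (x :: t) pvKey) (-1) with
        | some kv => kv.1
        | none => "")
    rw [← pvMax_eq_max?_getD, pvMain, PySem.List.pyGet?_neg_one]
    rcases hlast : (PySem.List.sorted (x :: t) pvKey).getLast? with _ | kv
    · have hsne : PySem.List.sorted (x :: t) pvKey ≠ [] := by
        rw [Ne, PySem.List.sorted_eq_nil_iff]; simp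
      rw [← List.getLast?_isSome, hlast] at hsne
      simp at hsne
    · simp

-- ===== VERDICT (by name: the statement is the Claim_ definition above) =====
theorem question_4_spec : Claim_equal_question_4 := by
  intro dishes _
  unfold Spec_question_4
  exact pv_equal dishes
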